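-- pv_equiv track=rewrite | github.com/Argx2121/Sega_NN_tools | io/nn/optimise_no.py | convert_3_to_4
-- ===== SOURCE A (Python) =====
-- def convert_3_to_4(group_3):
--     # (0, 1, 2), (1, 2, 3), (4, 5, 6)) ->
--     # (0, 1, 2, 3, 4, 5, 6)
--     bone_list = list(set([bone for l in group_3 for bone in l]))  # flatten and de dup
--
--     # ((0), (0, 1), (0, 2) [...], (0, 1), (1), (1, 2)) ->
--     bone_dict = []
--     for i in bone_list:
--         for j in bone_list:
--             bone_dict.append(tuple(sorted({i, j})))
--     # ((0, 1), (0, 2) [...], (1, 2))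
--     bone_dict = set([a for a in bone_dict if len(a) > 1])
--
--     # ((0, 1):[], (0, 2):[] [...], (1, 2):[]) ->
--     bone_dict = dict([(a, []) for a in bone_dict])
--     # ((0, 1):[[0, 1, 2]], (0, 2):[[0, 1, 2]] [...], (1, 2):[[0, 1, 2], [1, 2, 3]])
--     for group in group_3:
--         g = []
--         for i in group:
--             for j in group:
--                 g.append(tuple(sorted({i, j})))
--         g = set([a for a in g if len(a) > 1])
--         for a in g:
--             bone_dict[a].append(list(group))
--
--     # ((0, 1):[[0, 1, 2]], (0, 2):[[0, 1, 2]] [...], (1, 2):[[0, 1, 2], [1, 2, 3]])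
--     # loses any empties (and values that don't have a value to pair it to)
--     # so it becomes (1, 2):[[0, 1, 2], [1, 2, 3]] that are used
--     # which becomes [0, 1, 2, 3] and is returned in a list of other 4 value long groups
--     new_data = []
--     for _, data in bone_dict.items():
--         for a, b in zip(data[::2], data[1::2]):
--             new_data.append(tuple(sorted(set(a + b))))
--     return set(new_data)
-- ===== SOURCE B (Python) =====
-- def convert_3_to_4(group_3):
--     # For every pair of distinct bones, collect the groups containing both and
--     # merge them consecutively (1st with 2nd, 3rd with 4th, ...).
--     bones = list(dict.fromkeys(b for g in group_3 for b in g))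
--     merged = set()
--     for i, a in enumerate(bones):
--         for b in bones[i + 1:]:
--             occ = [g for g in group_3 if a in g and b in g]
--             for u, v in zip(occ[::2], occ[1::2]):
--                 merged.add(tuple(sorted(set(u + v))))
--     return merged
-- ===== Notes on version B (the rewrite author's own statement) =====
-- stated objective: simpler
-- what changed: B drops A's pair-key universe, per-group pair sets and per-pair dict of group lists: for every pair of distinct bones it directly filters the groups containing both and merges them consecutively.
import Mathlib
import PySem

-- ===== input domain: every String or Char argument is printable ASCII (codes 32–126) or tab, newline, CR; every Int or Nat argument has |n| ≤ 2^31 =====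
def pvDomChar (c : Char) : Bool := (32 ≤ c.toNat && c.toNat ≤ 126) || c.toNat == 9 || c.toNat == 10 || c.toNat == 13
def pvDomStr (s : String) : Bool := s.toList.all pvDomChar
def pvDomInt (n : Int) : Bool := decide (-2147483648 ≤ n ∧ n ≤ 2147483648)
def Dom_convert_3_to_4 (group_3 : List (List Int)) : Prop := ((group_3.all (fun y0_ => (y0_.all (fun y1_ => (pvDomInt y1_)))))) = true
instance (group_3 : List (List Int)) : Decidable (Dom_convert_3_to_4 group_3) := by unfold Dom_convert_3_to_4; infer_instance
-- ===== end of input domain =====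

-- B replaces A's pair-key universe, per-group pair sets and per-pair dict of group
-- lists by a direct scan: for every pair of distinct bones, filter the groups
-- containing both and merge them consecutively (objective: simpler; same set result).

-- ===== PORT A =====
-- tuple(sorted({i, j}))
def spairA (i j : Int) : List Int := PySem.List.sorted (PySem.Set.ofList [i, j]) (fun x => x)

def convert_3_to_4 (group_3 : List (List Int)) : List (List Int) :=
  let bone_list : List Int := PySem.Set.ofList (group_3.flatMap (fun l => l))
  let bone_dict0 : List (List Int) :=
    bone_list.foldl (fun acc i => bone_list.foldl (fun acc j => acc ++ [spairA i j]) acc) []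
  let pairKeys : List (List Int) :=
    PySem.Set.ofList (bone_dict0.filter (fun a => decide (1 < PySem.List.len a)))
  let d0 : PySem.Dict (List Int) (List (List Int)) :=
    PySem.Dict.ofList (pairKeys.map (fun a => (a, [])))
  let d1 := group_3.foldl (fun d group =>
    let g0 := group.foldl (fun acc i => group.foldl (fun acc j => acc ++ [spairA i j]) acc) []
    let g : List (List Int) := PySem.Set.ofList (g0.filter (fun a => decide (1 < PySem.List.len a)))
    -- bone_dict[a].append(list(group)): the key a is always present in bone_dict
    -- (a is a pair of bones of group ⊆ bone_list), so d[a] = d.get(a) ++ [group] is exact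
    g.foldl (fun d a => d.modify a [] (fun v => v ++ [group])) d) d0
  let new_data : List (List Int) := d1.items.foldl (fun nd it =>
    (List.zip ((PySem.List.slice? it.2 none none 2).getD [])
              ((PySem.List.slice? it.2 (some 1) none 2).getD [])).foldl
      (fun nd ab => nd ++ [PySem.List.sorted (PySem.Set.ofList (ab.1 ++ ab.2)) (fun x => x)]) nd) []
  PySem.Set.ofList new_data

-- ===== PORT B =====
-- tuple(sorted(set(u + v)))
def mergeB (u v : List Int) : List Int := PySem.List.sorted (PySem.Set.ofList (u ++ v)) (fun x => x)

def convert_3_to_4_alt (group_3 : List (List Int)) : List (List Int) :=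
  let bones : List Int := PySem.List.dedup (group_3.flatMap (fun g => g))
  (PySem.List.enumerate bones 0).foldl (fun merged ia =>
      (PySem.List.slice bones (some (ia.1 + 1)) none).foldl (fun merged b =>
          let occ := group_3.filter (fun g => decide (ia.2 ∈ g) && decide (b ∈ g))
          (List.zip ((PySem.List.slice? occ none none 2).getD [])
                    ((PySem.List.slice? occ (some 1) none 2).getD [])).foldl
            (fun merged uv => PySem.Set.add merged (mergeB uv.1 uv.2)) merged)
        merged)
    PySem.Set.empty

-- ===== PRECONDITION & SPEC =====
def Spec_convert_3_to_4 (group_3 : List (List Int)) (out : List (List Int)) : Prop := out = convert_3_to_4_alt group_3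
instance (group_3 : List (List Int)) (out : List (List Int)) : Decidable (Spec_convert_3_to_4 group_3 out) := by unfold Spec_convert_3_to_4; infer_instance

-- ===== CLAIM (what is proved, stated in full; the proofs are below) =====
def Claim_equal_convert_3_to_4 : Prop := ∀ (group_3 : List (List Int)), Dom_convert_3_to_4 group_3 → Spec_convert_3_to_4 group_3 (convert_3_to_4 group_3)

-- ===== LEMMAS AND PROOFS =====

-- proof-side definitions -------------------------------------------------

/-- all unordered pairs of a list, first element first -/
def pairsB : List Int → List (Int × Int)
  | [] => []
  | x :: t => t.map (fun y => (x, y)) ++ pairsB t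

/-- data[::2] -/
def evens {α : Type} : List α → List α
  | [] => []
  | [a] => [a]
  | a :: _ :: t => a :: evens t

/-- data[1::2] -/
def odds {α : Type} : List α → List α
  | [] => []
  | [_] => []
  | _ :: b :: t => b :: odds t

/-- the merges one key's group list contributes -/
def mzip (data : List (List Int)) : List (List Int) :=
  (List.zip (evens data) (odds data)).map (fun ab => mergeB ab.1 ab.2)

/-- pair keys contributed by A's outer×inner bone loop, with `pre` already processed -/
def pairsOf2 : List Int → List Int → List (List Int)
  | [], _ => []
  | x :: p, bs => (p ++ bs).map (spairA x) ++ pairsOf2 p bs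

/-- groups containing both x and y, in input order -/
def occ (group_3 : List (List Int)) (x y : Int) : List (List Int) :=
  group_3.filter (fun g => decide (x ∈ g) && decide (y ∈ g))

def gsetA (g : List Int) : List (List Int) :=
  PySem.Set.ofList ((g.flatMap (fun i => g.map (spairA i))).filter (fun a => decide (1 < PySem.List.len a)))

-- spair basics ------------------------------------------------------------

theorem ofList_pair_ne {i j : Int} (h : i ≠ j) : PySem.Set.ofList [i, j] = [i, j] := by
  simp [PySem.Set.ofList_eq_foldl, PySem.Set.add, PySem.Set.contains, h.symm]

theorem spairA_lt {i j : Int} (h : i < j) : spairA i j = [i, j] := by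
  unfold spairA
  rw [ofList_pair_ne h.ne]
  exact PySem.List.sorted_eq_of_perm_of_pairwise_lt _ _ _ (List.Perm.refl _) (by simp [h])

theorem spairA_gt {i j : Int} (h : j < i) : spairA i j = [j, i] := by
  unfold spairA
  rw [ofList_pair_ne h.ne']
  exact PySem.List.sorted_eq_of_perm_of_pairwise_lt _ _ _ (List.Perm.swap _ _ _) (by simp [h])

theorem spairA_self (i : Int) : spairA i i = [i] := by
  unfold spairA
  have : PySem.Set.ofList [i, i] = [i] := by
    simp [PySem.Set.ofList_eq_foldl, PySem.Set.add, PySem.Set.contains]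
  rw [this]
  exact PySem.List.sorted_eq_of_perm_of_pairwise_lt _ _ _ (List.Perm.refl _) (by simp)

theorem spairA_comm (i j : Int) : spairA i j = spairA j i := by
  rcases lt_trichotomy i j with h | h | h
  · rw [spairA_lt h, spairA_gt h]
  · rw [h]
  · rw [spairA_gt h, spairA_lt h]

theorem spairA_long {i j : Int} (h : i ≠ j) : decide (1 < PySem.List.len (spairA i j)) = true := by
  rcases lt_or_gt_of_ne h with h' | h'
  · rw [spairA_lt h']; simp [PySem.List.len_eq]
  · rw [spairA_gt h']; simp [PySem.List.len_eq]

theorem spairA_short (i : Int) : decide (1 < PySem.List.len (spairA i i)) = false := by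
  rw [spairA_self]; simp [PySem.List.len_eq]

theorem spairA_ne_of_long {i j : Int} (h : decide (1 < PySem.List.len (spairA i j)) = true) : i ≠ j := by
  intro hij; subst hij; rw [spairA_short] at h; simp at h

theorem spairA_inj {i j k l : Int} (hij : i ≠ j) (hkl : k ≠ l)
    (h : spairA i j = spairA k l) : (i = k ∧ j = l) ∨ (i = l ∧ j = k) := by
  rcases lt_or_gt_of_ne hij with h1 | h1 <;> rcases lt_or_gt_of_ne hkl with h2 | h2 <;>
    [rw [spairA_lt h1, spairA_lt h2] at h; rw [spairA_lt h1, spairA_gt h2] at h;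
     rw [spairA_gt h1, spairA_lt h2] at h; rw [spairA_gt h1, spairA_gt h2] at h] <;>
    simp at h <;> omega

theorem spairA_inj2 {b j j' : Int} (hj : j ≠ b) (hj' : j' ≠ b)
    (h : spairA b j = spairA b j') : j = j' := by
  rcases spairA_inj (Ne.symm hj) (Ne.symm hj') h with ⟨h1, h2⟩ | ⟨h1, h2⟩ <;> omega

-- generic list/set helpers ------------------------------------------------
theorem flatMap_congr_mem {α β : Type} {l : List α} {f g : α → List β}
    (h : ∀ x ∈ l, f x = g x) : l.flatMap f = l.flatMap g := by
  induction l with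
  | nil => rfl
  | cons x t ih =>
    simp only [List.flatMap_cons, h x (by simp), ih (fun y hy => h y (by simp [hy]))]

theorem filter_flatMap {α β : Type} (l : List α) (f : α → List β) (p : β → Bool) :
    (l.flatMap f).filter p = l.flatMap (fun a => (f a).filter p) := by
  induction l with
  | nil => rfl
  | cons x t ih => simp [List.filter_append, ih]

theorem set_update_mem {s l : List (List Int)} (h : ∀ x ∈ l, x ∈ s) :
    PySem.Set.update s l = s := by
  induction l generalizing s with
  | nil => rfl
  | cons x t ih =>
    rw [PySem.Set.update_cons, PySem.Set.add_of_mem (h x (by simp))]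
    exact ih (fun y hy => h y (by simp [hy]))

theorem set_update_fresh {s l : List (List Int)} (h : ∀ x ∈ l, x ∉ s) (hl : l.Nodup) :
    PySem.Set.update s l = s ++ l := by
  induction l generalizing s with
  | nil => simp [PySem.Set.update]
  | cons x t ih =>
    rw [PySem.Set.update_cons, PySem.Set.add_of_not_mem (h x (by simp))]
    rw [ih (s := s ++ [x]) ?_ hl.of_cons]
    · simp
    · intro y hy hmem
      rcases List.mem_append.1 hmem with h1 | h1
      · exact h y (by simp [hy]) h1
      · simp at h1; subst h1; exact (List.nodup_cons.1 hl).1 hy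

theorem filter_beq_of_nodup {κ : Type} [BEq κ] [LawfulBEq κ] {l : List κ} (hl : l.Nodup) (k : κ) :
    l.filter (fun x => x == k) = if k ∈ l then [k] else [] := by
  induction l with
  | nil => simp
  | cons x t ih =>
    by_cases hx : x = k
    · subst hx
      have : x ∉ t := (List.nodup_cons.1 hl).1
      simp [ih hl.of_cons, this]
    · simp only [List.filter_cons, beq_iff_eq, hx, if_false, ih hl.of_cons]
      simp [List.mem_cons, Ne.symm hx]

theorem foldl_nested {α β γ : Type} (l : List γ) (K : γ → List α) (f : β → α → γ → β) (b : β) :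
    l.foldl (fun d g => (K g).foldl (fun d a => f d a g) d) b
      = (l.flatMap (fun g => (K g).map (fun a => (a, g)))).foldl (fun d e => f d e.1 e.2) b := by
  induction l generalizing b with
  | nil => rfl
  | cons x t ih =>
    simp only [List.foldl_cons, List.flatMap_cons, List.foldl_append, List.foldl_map, ih]

theorem filter_entries {κ : Type} [BEq κ] [LawfulBEq κ] (g3 : List (List Int)) (K : List Int → List κ)
    (hK : ∀ g, (K g).Nodup) (k : κ) :
    (((g3.flatMap (fun g => (K g).map (fun a => (a, g)))).filter (fun e => e.1 == k)).map (fun e => e.2))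
      = g3.filter (fun g => decide (k ∈ K g)) := by
  induction g3 with
  | nil => rfl
  | cons g t ih =>
    simp only [List.flatMap_cons, List.filter_append, List.map_append, ih]
    rw [List.filter_map]
    have : ((K g).filter ((fun e => e.1 == k) ∘ (fun a => (a, g)))) = (K g).filter (fun x => x == k) := rfl
    rw [this, filter_beq_of_nodup (hK g) k]
    by_cases h : k ∈ K g
    · simp [h]
    · simp [h]

theorem foldl_set_update {α : Type} (l : List α) (h : α → List (List Int)) (s : List (List Int)) :
    l.foldl (fun s x => PySem.Set.update s (h x)) s = PySem.Set.update s (l.flatMap h) := by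
  induction l generalizing s with
  | nil => simp [PySem.Set.update]
  | cons x t ih => simp only [List.foldl_cons, List.flatMap_cons, PySem.Set.update_append, ih]

-- pairsOf2 / pairsB -------------------------------------------------------

theorem pairsOf2_snoc (pre : List Int) (b : Int) (bs : List Int) :
    pairsOf2 (pre ++ [b]) bs = pairsOf2 pre (b :: bs) ++ bs.map (spairA b) := by
  induction pre with
  | nil => simp [pairsOf2]
  | cons x p ih =>
    simp only [List.cons_append, pairsOf2, ih]
    rw [List.append_assoc p [b] bs]
    simp [List.append_assoc]

theorem mem_pairsOf2 {pre bs : List Int} (h : (pre ++ bs).Nodup) {k : List Int}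
    (hk : k ∈ pairsOf2 pre bs) : ∃ p q, p ∈ pre ∧ q ∈ pre ++ bs ∧ p ≠ q ∧ k = spairA p q := by
  induction pre with
  | nil => simp [pairsOf2] at hk
  | cons x p ih =>
    have h' : (x :: (p ++ bs)).Nodup := by rwa [List.cons_append] at h
    simp only [pairsOf2, List.mem_append, List.mem_map] at hk
    rcases hk with ⟨q, hq, rfl⟩ | hk
    · refine ⟨x, q, by simp, by simp [List.mem_append] at hq ⊢; tauto, ?_, rfl⟩
      intro hxq; subst hxq
      exact (List.nodup_cons.1 h').1 (List.mem_append.2 (by simpa using hq))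
    · obtain ⟨p', q', hp', hq', hne, rfl⟩ := ih (List.nodup_cons.1 h').2 hk
      exact ⟨p', q', by simp [hp'], by simp [List.mem_append] at hq' ⊢; tauto, hne, rfl⟩

theorem mem_pairsOf2_of {p : Int} {pre : List Int} (hp : p ∈ pre) {q : Int} {bs : List Int}
    (hq : q ∈ bs) : spairA p q ∈ pairsOf2 pre bs := by
  induction pre with
  | nil => simp at hp
  | cons x t ih =>
    rcases List.mem_cons.1 hp with rfl | hp'
    · simp only [pairsOf2, List.mem_append]
      exact Or.inl (List.mem_map.2 ⟨q, List.mem_append.2 (Or.inr hq), rfl⟩)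
    · simp only [pairsOf2, List.mem_append]
      exact Or.inr (ih hp')

theorem pairsOf2_nil_eq (bs : List Int) :
    pairsOf2 bs [] = (pairsB bs).map (fun ab => spairA ab.1 ab.2) := by
  induction bs with
  | nil => rfl
  | cons x t ih => simp [pairsOf2, pairsB, ih, List.map_map]

theorem mem_pairsB_nodup {bs : List Int} (h : bs.Nodup) {x y : Int} (hxy : (x, y) ∈ pairsB bs) :
    x ∈ bs ∧ y ∈ bs ∧ x ≠ y := by
  induction bs with
  | nil => simp [pairsB] at hxy
  | cons a t ih =>
    simp only [pairsB, List.mem_append, List.mem_map] at hxy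
    rcases hxy with ⟨y', hy', he⟩ | hxy
    · obtain ⟨rfl, rfl⟩ := Prod.mk.injEq .. ▸ (Prod.ext_iff.1 he)
      refine ⟨by simp, by simp [hy'], ?_⟩
      intro hh; subst hh; exact (List.nodup_cons.1 h).1 hy'
    · obtain ⟨h1, h2, h3⟩ := ih (List.nodup_cons.1 h).2 hxy
      exact ⟨by simp [h1], by simp [h2], h3⟩

-- A's pair-key universe, in order -----------------------------------------

theorem univ_aux (bs : List Int) : ∀ pre : List Int, (pre ++ bs).Nodup →
    PySem.Set.update (pairsOf2 pre bs)
        (bs.flatMap (fun i => ((pre ++ bs).map (spairA i)).filter (fun a => decide (1 < PySem.List.len a))))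
      = pairsOf2 (pre ++ bs) [] := by
  induction bs with
  | nil => intro pre h; simp [PySem.Set.update]
  | cons b bs2 ih =>
    intro pre h
    have hb_pre : b ∉ pre := by
      intro hmem
      exact (List.disjoint_of_nodup_append h) hmem (by simp)
    have hb_bs2 : b ∉ bs2 := by
      have := (h.of_append_right : (b :: bs2).Nodup)
      exact (List.nodup_cons.1 this).1
    have hdisj : ∀ x ∈ pre, x ∉ bs2 := by
      intro x hx hx2
      exact (List.disjoint_of_nodup_append h) hx (by simp [hx2])
    have hbs2 : bs2.Nodup := ((h.of_append_right : (b :: bs2).Nodup)).of_cons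
    have hmid : List.filter (fun a => decide (1 < PySem.List.len a)) (List.map (spairA b) [b]) = [] := by
      rw [List.map_cons, List.map_nil, List.filter_cons, spairA_short]
      simp
    have hinner :
        ((pre ++ b :: bs2).map (spairA b)).filter (fun a => decide (1 < PySem.List.len a))
          = pre.map (spairA b) ++ bs2.map (spairA b) := by
      rw [show pre ++ b :: bs2 = pre ++ [b] ++ bs2 by simp, List.map_append, List.map_append,
        List.filter_append, List.filter_append, hmid]
      rw [List.filter_eq_self.2 (fun x hx => by
        obtain ⟨p, hp, rfl⟩ := List.mem_map.1 hx
        exact spairA_long (fun hh => hb_pre (hh ▸ hp)))]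
      rw [List.filter_eq_self.2 (fun x hx => by
        obtain ⟨p, hp, rfl⟩ := List.mem_map.1 hx
        exact spairA_long (fun hh => hb_bs2 (hh ▸ hp)))]
      simp
    have h1 : PySem.Set.update (pairsOf2 pre (b :: bs2)) (pre.map (spairA b))
        = pairsOf2 pre (b :: bs2) := by
      apply set_update_mem
      intro x hx
      obtain ⟨p, hp, rfl⟩ := List.mem_map.1 hx
      rw [spairA_comm]
      exact mem_pairsOf2_of hp (by simp)
    have h2 : PySem.Set.update (pairsOf2 pre (b :: bs2)) (bs2.map (spairA b))
        = pairsOf2 pre (b :: bs2) ++ bs2.map (spairA b) := by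
      apply set_update_fresh
      · intro x hx hmem
        obtain ⟨j, hj, rfl⟩ := List.mem_map.1 hx
        obtain ⟨p, q, hp, hq, hpq, he⟩ := mem_pairsOf2 h hmem
        have hbj : b ≠ j := fun hh => hb_bs2 (hh ▸ hj)
        rcases spairA_inj hbj hpq he with ⟨hh1, hh2⟩ | ⟨hh1, hh2⟩
        · exact hb_pre (hh1 ▸ hp)
        · exact hdisj p hp (hh2 ▸ hj)
      · exact List.Nodup.map_on (fun j hj j' hj' he =>
          spairA_inj2 (fun hh => hb_bs2 (by rwa [hh] at hj)) (fun hh => hb_bs2 (by rwa [hh] at hj')) he) hbs2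
    rw [List.flatMap_cons, PySem.Set.update_append, hinner, PySem.Set.update_append, h1, h2,
      ← pairsOf2_snoc]
    have hlist : pre ++ [b] ++ bs2 = pre ++ b :: bs2 := by simp
    have := ih (pre ++ [b]) (by rwa [hlist])
    rw [hlist] at this
    exact this

theorem univ_eq {bs : List Int} (h : bs.Nodup) :
    PySem.Set.ofList ((bs.flatMap (fun i => bs.map (spairA i))).filter (fun a => decide (1 < PySem.List.len a)))
      = (pairsB bs).map (fun ab => spairA ab.1 ab.2) := by
  have hof : ∀ l : List (List Int), PySem.Set.ofList l = PySem.Set.update ([] : PySem.Set (List Int)) l := by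
    intro l
    have := PySem.Set.ofList_append ([] : List (List Int)) l
    simpa using this
  rw [hof, filter_flatMap]
  have := univ_aux bs [] (by simpa using h)
  simp only [List.nil_append] at this
  rw [show pairsOf2 [] bs = ([] : List (List Int)) from rfl] at this
  rw [this, pairsOf2_nil_eq]

-- gsetA membership ---------------------------------------------------------

theorem gsetA_nodup (g : List Int) : (gsetA g).Nodup := PySem.Set.nodup_ofList _

theorem mem_gsetA {a b : Int} (hab : a ≠ b) (g : List Int) :
    spairA a b ∈ gsetA g ↔ (a ∈ g ∧ b ∈ g) := by
  unfold gsetA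
  rw [PySem.Set.mem_ofList, List.mem_filter]
  constructor
  · rintro ⟨hmem, hlong⟩
    obtain ⟨i, hi, hmap⟩ := List.mem_flatMap.1 hmem
    obtain ⟨j, hj, he⟩ := List.mem_map.1 hmap
    have hij : i ≠ j := spairA_ne_of_long (he ▸ hlong)
    rcases spairA_inj hij hab he with ⟨hh1, hh2⟩ | ⟨hh1, hh2⟩
    · exact ⟨hh1 ▸ hi, hh2 ▸ hj⟩
    · exact ⟨hh2 ▸ hj, hh1 ▸ hi⟩
  · rintro ⟨ha, hb⟩
    exact ⟨List.mem_flatMap.2 ⟨a, ha, List.mem_map.2 ⟨b, hb, rfl⟩⟩, spairA_long hab⟩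

-- dictionary lemmas --------------------------------------------------------

theorem d0_items (ys : List (List Int)) (h : ys.Nodup) :
    (PySem.Dict.ofList (ys.map (fun a => (a, ([] : List (List Int)))))).items
      = ys.map (fun a => (a, [])) := by
  show (PySem.Dict.empty.update (ys.map (fun a => (a, ([] : List (List Int)))))).items = _
  unfold PySem.Dict.update
  rw [List.foldl_map]
  have := PySem.Dict.items_foldl_insert_fresh ys (fun a => a) (fun _ => ([] : List (List Int)))
    PySem.Dict.empty (fun a _ => PySem.Dict.contains_empty a) (by simpa using h)
  simpa using this

theorem getD_const_nil {κ : Type} [BEq κ] (d : PySem.Dict κ (List (List Int)))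
    (h : ∀ p ∈ d.items, p.2 = ([] : List (List Int))) (k : κ) : d.getD k [] = [] := by
  unfold PySem.Dict.getD PySem.Dict.get?
  cases hfind : List.find? (fun p => p.1 == k) d.items with
  | none => rfl
  | some p => simp [h p (List.mem_of_find?_eq_some hfind)]

-- slicing --------------------------------------------------------------------

theorem slice2_red {α : Type} (xs : List α) : PySem.List.slice? xs none none 2
    = some (List.filterMap (fun (k : Nat) => xs[((2 : Int) * (k : Int)).toNat]?)
        (List.range ((xs.length + 1) / 2))) := by
  unfold PySem.List.slice? PySem.List.sliceIndices
  norm_num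
  congr 1
  split <;> rename_i h
  · have h2 : ((xs.length : Int) + 2 - 1) / 2 = (((xs.length + 1) / 2 : Nat) : Int) := by omega
    rw [h2, Int.toNat_natCast]
  · have h0 : xs.length = 0 := by omega
    rw [h0]

theorem slice2_red' {α : Type} (xs : List α) : PySem.List.slice? xs (some 1) none 2
    = some (List.filterMap (fun (k : Nat) => xs[((1 : Int) + 2 * (k : Int)).toNat]?)
        (List.range (xs.length / 2))) := by
  cases xs with
  | nil => simp [PySem.List.slice?, PySem.List.sliceIndices]
  | cons x t =>
    unfold PySem.List.slice? PySem.List.sliceIndices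
    norm_num
    congr 1
    split <;> rename_i h
    · have h2 : ((t.length : Int) + 2 - 1) / 2 = (((t.length + 1) / 2 : Nat) : Int) := by omega
      rw [h2, Int.toNat_natCast]
    · have h0 : t.length = 0 := by omega
      rw [h0]

theorem fm_evens {α : Type} : ∀ xs : List α,
    List.filterMap (fun (k : Nat) => xs[((2 : Int) * (k : Int)).toNat]?)
      (List.range ((xs.length + 1) / 2)) = evens xs := by
  intro xs
  induction xs using evens.induct with
  | case1 => simp [evens]
  | case2 a => norm_num [List.range_succ, evens, List.filterMap_cons]
  | case3 a b t ih =>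
    rw [show ((a :: b :: t).length + 1) / 2 = (t.length + 1) / 2 + 1 by simp; omega,
      List.range_succ_eq_map, List.filterMap_cons]
    simp only [Nat.cast_zero, mul_zero, Int.toNat_zero, List.getElem?_cons_zero]
    rw [List.filterMap_map]
    have hfun : ((fun (k : Nat) => (a :: b :: t)[((2 : Int) * (k : Int)).toNat]?) ∘ Nat.succ)
        = (fun (k : Nat) => t[((2 : Int) * (k : Int)).toNat]?) := by
      funext k
      show (a :: b :: t)[((2 : Int) * ((k + 1 : Nat) : Int)).toNat]? = _
      have h1 : ((2 : Int) * ((k + 1 : Nat) : Int)).toNat = ((2 : Int) * (k : Int)).toNat + 1 + 1 := by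
        push_cast; omega
      rw [h1, List.getElem?_cons_succ, List.getElem?_cons_succ]
    rw [hfun, ih]
    simp [evens]

theorem fm_odds {α : Type} : ∀ xs : List α,
    List.filterMap (fun (k : Nat) => xs[((1 : Int) + 2 * (k : Int)).toNat]?)
      (List.range (xs.length / 2)) = odds xs := by
  intro xs
  induction xs using odds.induct with
  | case1 => simp [odds]
  | case2 a => simp [odds]
  | case3 a b t ih =>
    rw [show (a :: b :: t).length / 2 = t.length / 2 + 1 by simp; omega,
      List.range_succ_eq_map, List.filterMap_cons]
    simp only [Nat.cast_zero, mul_zero, add_zero, Int.toNat_one, List.getElem?_cons_succ,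
      List.getElem?_cons_zero]
    rw [List.filterMap_map]
    have hfun : ((fun (k : Nat) => (a :: b :: t)[((1 : Int) + 2 * (k : Int)).toNat]?) ∘ Nat.succ)
        = (fun (k : Nat) => t[((1 : Int) + 2 * (k : Int)).toNat]?) := by
      funext k
      show (a :: b :: t)[((1 : Int) + 2 * ((k + 1 : Nat) : Int)).toNat]? = _
      have h1 : ((1 : Int) + 2 * ((k + 1 : Nat) : Int)).toNat = ((1 : Int) + 2 * (k : Int)).toNat + 1 + 1 := by
        push_cast; omega
      rw [h1, List.getElem?_cons_succ, List.getElem?_cons_succ]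
    rw [hfun, ih]
    simp [odds]

theorem evens_slice {α : Type} (xs : List α) : PySem.List.slice? xs none none 2 = some (evens xs) := by
  rw [slice2_red, fm_evens]

theorem odds_slice {α : Type} (xs : List α) : PySem.List.slice? xs (some 1) none 2 = some (odds xs) := by
  rw [slice2_red', fm_odds]

-- nested foldl-append loops → flatMap/map -------------------------------------

theorem g0_eq (g : List Int) :
    g.foldl (fun acc i => g.foldl (fun acc j => acc ++ [spairA i j]) acc) []
      = g.flatMap (fun i => g.map (spairA i)) := by
  have hfun : (fun (acc : List (List Int)) i => g.foldl (fun acc j => acc ++ [spairA i j]) acc)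
      = (fun acc i => acc ++ g.map (spairA i)) := by
    funext acc i
    exact PySem.List.foldl_append_singleton_eq_map _ _ _
  rw [hfun, PySem.List.foldl_append_eq_flatMap]
  simp

-- B's enumerate/suffix double loop visits exactly pairsB ---------------------

theorem enum_drop_pairs {β : Type} (F : Int → Int → List β) :
    ∀ (t full : List Int) (s : Nat), full.drop s = t →
    (PySem.List.enumerate t (s : Int)).flatMap
        (fun ia => (full.drop (ia.1 + 1).toNat).flatMap (F ia.2))
      = (pairsB t).flatMap (fun ab => F ab.1 ab.2) := by
  intro t
  induction t with
  | nil => intro full s h; simp [PySem.List.enumerate_nil, pairsB]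
  | cons x t' ih =>
    intro full s h
    rw [PySem.List.enumerate_cons, List.flatMap_cons]
    have hs1 : ((s : Int) + 1).toNat = s + 1 := by omega
    have hdrop : full.drop (s + 1) = t' := by
      have := congrArg (List.drop 1) h
      simpa [List.drop_drop, Nat.add_comm] using this
    have hpush : ((s : Int) + 1) = ((s + 1 : Nat) : Int) := by push_cast; ring
    rw [hs1, hdrop, hpush, ih full (s + 1) hdrop]
    simp [pairsB, List.flatMap_append, List.flatMap_map]

-- final assembly -----------------------------------------------------------

theorem key_mem_univ {g3 : List (List Int)} {g : List Int} (hg : g ∈ g3) {k : List Int}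
    (hk : k ∈ gsetA g) :
    k ∈ (pairsB (PySem.Set.ofList (g3.flatMap (fun l => l)))).map (fun ab => spairA ab.1 ab.2) := by
  unfold gsetA at hk
  rw [PySem.Set.mem_ofList, List.mem_filter] at hk
  obtain ⟨hmem, hlong⟩ := hk
  obtain ⟨i, hi, hmap⟩ := List.mem_flatMap.1 hmem
  obtain ⟨j, hj, rfl⟩ := List.mem_map.1 hmap
  rw [← univ_eq (PySem.Set.nodup_ofList _), PySem.Set.mem_ofList, List.mem_filter]
  have hmem' : ∀ x ∈ g, x ∈ PySem.Set.ofList (g3.flatMap (fun l => l)) := by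
    intro x hx
    rw [PySem.Set.mem_ofList]
    exact List.mem_flatMap.2 ⟨g, hg, hx⟩
  exact ⟨List.mem_flatMap.2 ⟨i, hmem' i hi, List.mem_map.2 ⟨j, hmem' j hj, rfl⟩⟩, hlong⟩

theorem A_eq (g3 : List (List Int)) :
    convert_3_to_4 g3
      = PySem.Set.ofList ((pairsB (PySem.Set.ofList (g3.flatMap (fun l => l)))).flatMap
          (fun ab => mzip (occ g3 ab.1 ab.2))) := by
  unfold convert_3_to_4
  dsimp only
  rw [g0_eq, univ_eq (PySem.Set.nodup_ofList _)]
  set bl : List Int := PySem.Set.ofList (g3.flatMap (fun l => l)) with hbl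
  set K : List (List Int) := (pairsB bl).map (fun ab => spairA ab.1 ab.2) with hK
  have hKnodup : K.Nodup := by
    rw [hK, ← univ_eq (PySem.Set.nodup_ofList _)]
    exact PySem.Set.nodup_ofList _
  set d0 : PySem.Dict (List Int) (List (List Int)) := PySem.Dict.ofList (K.map (fun a => (a, []))) with hd0
  have hd0items : d0.items = K.map (fun a => (a, [])) := d0_items K hKnodup
  have hGfun : (fun (d : PySem.Dict (List Int) (List (List Int))) (group : List Int) =>
        (PySem.Set.ofList ((group.foldl (fun acc i => group.foldl (fun acc j => acc ++ [spairA i j]) acc) []).filter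
            (fun a => decide (1 < PySem.List.len a))) : List (List Int)).foldl
          (fun d a => d.modify a [] (fun v => v ++ [group])) d)
      = (fun d group => (gsetA group).foldl (fun d a => d.modify a [] (fun v => v ++ [group])) d) := by
    funext d group
    rw [g0_eq]
    rfl
  rw [hGfun, foldl_nested g3 gsetA (fun d a g => d.modify a [] (fun v => v ++ [g])) d0]
  set E : List (List Int × List Int) := g3.flatMap (fun g => (gsetA g).map (fun a => (a, g))) with hE
  set D1 : PySem.Dict (List Int) (List (List Int)) :=
    E.foldl (fun d e => d.modify e.1 [] (fun v => v ++ [e.2])) d0 with hD1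
  have hget : ∀ k, D1.getD k [] = (E.filter (fun e => e.1 == k)).map (fun e => e.2) := by
    intro k
    rw [hD1, PySem.Dict.getD_foldl_modify_append E d0 k,
      getD_const_nil d0 (by
        rw [hd0items]
        intro p hp
        obtain ⟨a, _, rfl⟩ := List.mem_map.1 hp
        rfl) k]
    rfl
  have hkeys : D1.keys = K := by
    rw [hD1, PySem.Dict.keys_foldl_modify_key E (fun e => e.1) [] (fun d e => fun v => v ++ [e.2]) d0]
    have hd0keys : d0.keys = K := by
      unfold PySem.Dict.keys
      rw [hd0items, List.map_map]
      exact List.map_id K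
    rw [hd0keys]
    apply set_update_mem
    intro x hx
    obtain ⟨e, he, rfl⟩ := List.mem_map.1 hx
    obtain ⟨g, hg, hmem⟩ := List.mem_flatMap.1 (hE ▸ he)
    obtain ⟨a, ha, rfl⟩ := List.mem_map.1 hmem
    exact hK ▸ key_mem_univ hg ha
  have hitems : D1.items = K.map (fun k => (k, D1.getD k [])) := by
    rw [PySem.Dict.items_eq_map_keys D1 (hkeys ▸ hKnodup) [], hkeys]
  have hInner : (fun (nd : List (List Int)) (it : List Int × List (List Int)) =>
        (List.zip ((PySem.List.slice? it.2 none none 2).getD [])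
            ((PySem.List.slice? it.2 (some 1) none 2).getD [])).foldl
          (fun nd ab => nd ++ [PySem.List.sorted (PySem.Set.ofList (ab.1 ++ ab.2)) (fun x => x)]) nd)
      = (fun nd it => nd ++ mzip it.2) := by
    funext nd it
    rw [evens_slice, odds_slice]
    show (List.zip ((some (evens it.2)).getD []) ((some (odds it.2)).getD [])).foldl _ nd = _
    rw [Option.getD_some, Option.getD_some, PySem.List.foldl_append_singleton_eq_map]
    rfl
  rw [hInner, PySem.List.foldl_append_eq_flatMap, List.nil_append, hitems, List.flatMap_map]
  rw [hK, List.flatMap_map]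
  apply congrArg PySem.Set.ofList
  apply flatMap_congr_mem
  intro ab hab
  obtain ⟨-, -, hne⟩ := mem_pairsB_nodup (PySem.Set.nodup_ofList _) hab
  rw [hget, filter_entries g3 gsetA (fun g => gsetA_nodup g) (spairA ab.1 ab.2)]
  unfold occ
  apply congrArg mzip
  apply List.filter_congr
  intro g hg
  rw [Bool.eq_iff_iff]
  simp [mem_gsetA hne g]

theorem B_eq (g3 : List (List Int)) :
    convert_3_to_4_alt g3
      = PySem.Set.ofList ((pairsB (PySem.Set.ofList (g3.flatMap (fun l => l)))).flatMap
          (fun ab => mzip (occ g3 ab.1 ab.2))) := by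
  unfold convert_3_to_4_alt
  dsimp only
  rw [PySem.List.dedup_eq_ofList]
  set bl : List Int := PySem.Set.ofList (g3.flatMap (fun g => g)) with hbl
  -- the innermost zip-loop is an update by mzip occ
  have hInner : (fun (merged : List (List Int)) (ia : Int × Int) =>
        (PySem.List.slice bl (some (ia.1 + 1)) none).foldl (fun merged b =>
            let occ' := g3.filter (fun g => decide (ia.2 ∈ g) && decide (b ∈ g))
            (List.zip ((PySem.List.slice? occ' none none 2).getD [])
                      ((PySem.List.slice? occ' (some 1) none 2).getD [])).foldl
              (fun merged uv => PySem.Set.add merged (mergeB uv.1 uv.2)) merged)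
          merged)
      = (fun merged ia =>
          PySem.Set.update merged
            ((PySem.List.slice bl (some (ia.1 + 1)) none).flatMap (fun b => mzip (occ g3 ia.2 b)))) := by
    funext merged ia
    have hzip : (fun (merged : List (List Int)) (b : Int) =>
          let occ' := g3.filter (fun g => decide (ia.2 ∈ g) && decide (b ∈ g))
          (List.zip ((PySem.List.slice? occ' none none 2).getD [])
                    ((PySem.List.slice? occ' (some 1) none 2).getD [])).foldl
            (fun merged uv => PySem.Set.add merged (mergeB uv.1 uv.2)) merged)
        = (fun merged b => PySem.Set.update merged (mzip (occ g3 ia.2 b))) := by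
      funext merged b
      show (List.zip ((PySem.List.slice? (occ g3 ia.2 b) none none 2).getD [])
              ((PySem.List.slice? (occ g3 ia.2 b) (some 1) none 2).getD [])).foldl
            (fun merged uv => PySem.Set.add merged (mergeB uv.1 uv.2)) merged = _
      rw [evens_slice, odds_slice, Option.getD_some, Option.getD_some]
      rw [show mzip (occ g3 ia.2 b)
            = (List.zip (evens (occ g3 ia.2 b)) (odds (occ g3 ia.2 b))).map (fun uv => mergeB uv.1 uv.2)
          from rfl]
      rw [PySem.Set.update_map_eq_foldl_add]
    rw [hzip, foldl_set_update]
  rw [hInner, foldl_set_update]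
  have hupd : ∀ l : List (List Int), PySem.Set.update (PySem.Set.empty : PySem.Set (List Int)) l = PySem.Set.ofList l := by
    intro l
    have := PySem.Set.ofList_append ([] : List (List Int)) l
    simpa using this
  rw [hupd]
  apply congrArg PySem.Set.ofList
  have hcongr : (PySem.List.enumerate bl (0 : Int)).flatMap
        (fun ia => (PySem.List.slice bl (some (ia.1 + 1)) none).flatMap (fun b => mzip (occ g3 ia.2 b)))
      = (PySem.List.enumerate bl ((0 : Nat) : Int)).flatMap
        (fun ia => (bl.drop (ia.1 + 1).toNat).flatMap (fun b => mzip (occ g3 ia.2 b))) := by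
    rw [show ((0 : Nat) : Int) = (0 : Int) from rfl]
    apply flatMap_congr_mem
    intro ia hia
    obtain ⟨k, hk, he⟩ := (PySem.List.mem_enumerate_iff _ _ _).1 hia
    subst he
    dsimp only
    rw [PySem.List.slice_from _ (by omega)]
  rw [show (PySem.List.enumerate bl (0 : Int)) = (PySem.List.enumerate bl ((0 : Nat) : Int)) from rfl] at hcongr ⊢
  rw [hcongr, enum_drop_pairs (fun a b => mzip (occ g3 a b)) bl bl 0 (by simp)]

-- ===== VERDICT (by name: the statement is the Claim_ definition above) =====
theorem convert_3_to_4_spec : Claim_equal_convert_3_to_4 := by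
  intro group_3 _hdom
  unfold Spec_convert_3_to_4
  rw [A_eq, B_eq]
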